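-- pv_equiv track=rewrite | github.com/mbjackson-capp/adventofcode | 2015/day11.py | skip_forbidden_letters
-- ===== SOURCE A (Python) =====
-- FORBIDDEN = ("i", "o", "l")
--
-- def skip_forbidden_letters(password: str, forbidden=FORBIDDEN) -> str:
--     password = [char for char in password]
--     skip_to = {"i": "j", "l": "m", "o": "p"}
--     for i, char in enumerate(password):
--         if char in forbidden:
--             a_length = len(password) - i - 1
--             next = password[:i] + [skip_to[char]] + (["a"] * a_length)
--             return "".join(next)
--     return "".join(password)
-- ===== SOURCE B (Python) =====
-- FORBIDDEN = ("i", "o", "l")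
-- SKIP_TO = {"i": "j", "l": "m", "o": "p"}
--
--
-- def skip_forbidden_letters(password: str, forbidden=FORBIDDEN) -> str:
--     hits = [i for i in (password.find(f) for f in forbidden if len(f) == 1) if i != -1]
--     if not hits:
--         return password
--     idx = min(hits)
--     return password[:idx] + SKIP_TO[password[idx]] + "a" * (len(password) - idx - 1)
-- ===== Notes on version B (the rewrite author's own statement) =====
-- stated objective: faster
-- what changed: A explodes the password into a char list and scans every character with a membership test against forbidden; B instead does one str.find per (one-character) forbidden letter, takes the minimum of the non-(-1) hits as the replacement index, and builds the result by string slicing, with no per-character Python-level loop.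
-- outside the precondition, e.g. on skip_forbidden_letters('xa', ('x',)): A raises KeyError, B raises KeyError
import Mathlib
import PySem

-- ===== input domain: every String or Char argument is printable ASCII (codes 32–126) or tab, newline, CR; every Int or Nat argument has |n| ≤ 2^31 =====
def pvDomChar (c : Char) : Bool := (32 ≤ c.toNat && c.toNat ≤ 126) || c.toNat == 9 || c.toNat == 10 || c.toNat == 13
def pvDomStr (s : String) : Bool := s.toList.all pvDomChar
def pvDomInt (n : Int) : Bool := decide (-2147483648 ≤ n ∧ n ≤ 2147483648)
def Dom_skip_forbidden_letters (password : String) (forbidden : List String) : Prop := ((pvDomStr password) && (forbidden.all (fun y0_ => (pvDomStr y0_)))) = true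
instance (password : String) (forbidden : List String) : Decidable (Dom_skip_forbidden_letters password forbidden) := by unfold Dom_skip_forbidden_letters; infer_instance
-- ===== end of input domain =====

-- B replaces A's per-character scan by one str.find per forbidden letter plus a min; a timing run measured B faster.

-- ===== PORT A =====
-- 'for i, char in enumerate(password)': index counter + structural recursion over the chars.
-- On the KeyError of skip_to[char] (a found char outside {"i","l","o"}, excluded by Pre_) the port returns "".
def skipLoopA (skip_to : PySem.Dict String String) (forbidden : List String)
    (full : List Char) : Nat → List Char → String
  | _, [] => String.ofList full                       -- "".join(password)
  | i, c :: rest =>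
    if forbidden.contains (String.ofList [c]) then    -- char in forbidden
      let aLength := full.length - i - 1              -- len(password) - i - 1 (i < len at a hit)
      match skip_to.get? (String.ofList [c]) with     -- skip_to[char]; none = KeyError (outside Pre_)
      | some r => String.ofList (full.take i ++ r.toList ++ List.replicate aLength 'a')
      | none => ""
    else skipLoopA skip_to forbidden full (i + 1) rest

def skip_forbidden_letters (password : String) (forbidden : List String) : String :=
  let chars := password.toList                        -- [char for char in password]
  let skip_to : PySem.Dict String String :=
    PySem.Dict.ofList [("i", "j"), ("l", "m"), ("o", "p")]
  skipLoopA skip_to forbidden chars 0 chars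

-- ===== PORT B =====
def skipToB : PySem.Dict String String :=
  PySem.Dict.ofList [("i", "j"), ("l", "m"), ("o", "p")]

-- hits = [i for i in (password.find(f) for f in forbidden if len(f) == 1) if i != -1];
-- if empty return password, else replace at idx = min(hits).  KeyError of SKIP_TO → "" (outside Pre_).
def skip_forbidden_letters_alt (password : String) (forbidden : List String) : String :=
  let hits := ((forbidden.filter (fun f => PySem.Str.len f == 1)).map
      (fun f => PySem.Str.find password f)).filter (fun i => i != -1)
  match PySem.List.min? hits (fun x => x) with
  | none => password
  | some idx =>
    match PySem.Str.pyGet? password idx with          -- password[idx] (idx is a valid index here)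
    | none => ""
    | some c =>
      match skipToB.get? (String.ofList [c]) with     -- SKIP_TO[password[idx]]; none = KeyError
      | some r =>
          String.ofList (PySem.List.slice password.toList none (some idx)   -- password[:idx]
            ++ r.toList
            ++ List.replicate (PySem.Str.len password - idx - 1).toNat 'a') -- "a" * (len - idx - 1)
      | none => ""

-- ===== PRECONDITION & SPEC =====
-- Pre_ excludes exactly the inputs where A raises KeyError: the first password character that is a
-- member of forbidden (as a one-character string) is not a key of skip_to, i.e. not 'i', 'l' or 'o'.
def Pre_skip_forbidden_letters (password : String) (forbidden : List String) : Prop :=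
  ((password.toList.find? (fun c => forbidden.contains (String.ofList [c]))).all
    (fun c => c == 'i' || c == 'l' || c == 'o')) = true
instance (password : String) (forbidden : List String) : Decidable (Pre_skip_forbidden_letters password forbidden) := by unfold Pre_skip_forbidden_letters; infer_instance

def pvWitness_skip_forbidden_letters : String × List String := ("hello", ["i", "o", "l"])

def Spec_skip_forbidden_letters (password : String) (forbidden : List String) (out : String) : Prop := out = skip_forbidden_letters_alt password forbidden
instance (password : String) (forbidden : List String) (out : String) : Decidable (Spec_skip_forbidden_letters password forbidden out) := by unfold Spec_skip_forbidden_letters; infer_instance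

-- ===== CLAIM (what is proved, stated in full; the proofs are below) =====
def Claim_equal_skip_forbidden_letters : Prop := ∀ (password : String) (forbidden : List String), Dom_skip_forbidden_letters password forbidden → Pre_skip_forbidden_letters password forbidden → Spec_skip_forbidden_letters password forbidden (skip_forbidden_letters password forbidden)

-- ===== LEMMAS AND PROOFS =====

-- A's hit action at index i on character c (shared shape of both ports' replacement branch).
def pvHitA (d : PySem.Dict String String) (full : List Char) (i : Nat) (c : Char) : String :=
  match d.get? (String.ofList [c]) with
  | some r => String.ofList (full.take i ++ r.toList ++ List.replicate (full.length - i - 1) 'a')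
  | none => ""

theorem skipLoopA_spec (d : PySem.Dict String String) (F : List String) (full : List Char) :
    ∀ (suf : List Char) (k : Nat),
      skipLoopA d F full k suf =
        match suf.findIdx? (fun c => F.contains (String.ofList [c])) with
        | none => String.ofList full
        | some j => pvHitA d full (k + j) (suf[j]?.getD 'a') := by
  intro suf
  induction suf with
  | nil => intro k; simp [skipLoopA]
  | cons c rest ih =>
    intro k
    by_cases hm : String.ofList [c] ∈ F
    · simp [skipLoopA, hm, List.findIdx?_cons, pvHitA]
    · have hc : F.contains (String.ofList [c]) = false := by simpa using hm
      simp only [skipLoopA, hc, Bool.false_eq_true, if_false, ih (k + 1), List.findIdx?_cons]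
      cases h : rest.findIdx? (fun c => F.contains (String.ofList [c])) with
      | none => simp
      | some j =>
        simp only [Option.map_some]
        have hkj : k + (j + 1) = k + 1 + j := by omega
        simp [hkj]

theorem pv_singleton_prefix (d : Char) (l : List Char) : [d] <+: l ↔ l.head? = some d := by
  cases l with
  | nil => simp
  | cons a t => simp [List.cons_prefix_cons, eq_comm]

-- find on a one-character needle, at the position findIdx? names.
theorem find_singleton_eq (cs : List Char) (j : Nat) (hj : j < cs.length)
    (P : Char → Bool)
    (hmin : ∀ i (hi : i < cs.length), i < j → P cs[i] = false)
    (hsame : ∀ i (hi : i < cs.length), cs[i] = cs[j] → P cs[i] = true) :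
    PySem.Chars.find cs [cs[j]] = (j : Int) := by
  have hmem : cs[j] ∈ cs := List.getElem_mem hj
  have hnn : 0 ≤ PySem.Chars.find cs [cs[j]] :=
    (PySem.Chars.find_nonneg_iff cs [cs[j]]).mpr ((List.singleton_infix_iff _ _).mpr hmem)
  obtain ⟨hpre, hfirst⟩ := PySem.Chars.find_spec hnn
  set t := (PySem.Chars.find cs [cs[j]]).toNat with ht
  have hpj : [cs[j]] <+: cs.drop j := by
    have : (cs.drop j).head? = some cs[j] := by
      rw [List.head?_drop]; simp [hj]
    exact (pv_singleton_prefix _ _).mpr this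
  have htle : t ≤ j := by
    by_contra h
    exact hfirst j (by omega) hpj
  have hhead : (cs.drop t).head? = some cs[j] := (pv_singleton_prefix _ _).mp hpre
  have htlt : t < cs.length := by
    by_contra h
    rw [List.drop_eq_nil_of_le (by omega)] at hhead
    simp at hhead
  have hct : cs[t] = cs[j] := by
    rw [List.head?_drop] at hhead
    simpa [htlt] using hhead
  have hjle : j ≤ t := by
    by_contra h
    have := hmin t htlt (by omega)
    rw [hsame t htlt hct] at this
    simp at this
  have : t = j := by omega
  omega

-- The minimum of the collected finds is exactly the first index whose character is forbidden.
theorem min_hits_eq (password : String) (F : List String) :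
    PySem.List.min? (((F.filter (fun f => PySem.Str.len f == 1)).map
        (fun f => PySem.Str.find password f)).filter (fun i => i != -1)) (fun x => x)
      = (password.toList.findIdx? (fun c => F.contains (String.ofList [c]))).map
          (fun j => (j : Int)) := by
  set cs := password.toList with hcs
  set P : Char → Bool := fun c => F.contains (String.ofList [c]) with hPdef
  set hits := ((F.filter (fun f => PySem.Str.len f == 1)).map
      (fun f => PySem.Str.find password f)).filter (fun i => i != -1) with hhits
  -- every element of hits is the find of some one-character forbidden string
  have hits_shape : ∀ x ∈ hits, ∃ d : Char, String.ofList [d] ∈ F ∧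
      x = PySem.Chars.find cs [d] ∧ x ≠ -1 := by
    intro x hx
    rw [hhits, List.mem_filter] at hx
    obtain ⟨hx1, hx2⟩ := hx
    rw [List.mem_map] at hx1
    obtain ⟨f, hf, hfx⟩ := hx1
    rw [List.mem_filter] at hf
    obtain ⟨hfF, hflen⟩ := hf
    have hlen : f.toList.length = 1 := by
      have := PySem.Str.len_eq f
      have h1 : PySem.Str.len f = 1 := by simpa using hflen
      omega
    obtain ⟨d, hd⟩ := List.length_eq_one_iff.mp hlen
    refine ⟨d, ?_, ?_, by simpa using hx2⟩
    · have : String.ofList f.toList = f := by simp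
      rw [hd] at this; rwa [this]
    · rw [← hfx, PySem.Str.find_eq, hd]
  cases h : cs.findIdx? P with
  | none =>
    have hnone := List.findIdx?_eq_none_iff.mp h
    have : hits = [] := by
      rw [List.eq_nil_iff_forall_not_mem]
      intro x hx
      obtain ⟨d, hdF, hxd, hxne⟩ := hits_shape x hx
      have hfind : PySem.Chars.find cs [d] = -1 := by
        rw [PySem.Chars.find_eq_neg_one_iff]
        intro hinf
        have hdmem : d ∈ cs := (List.singleton_infix_iff d cs).mp hinf
        have hcontra := hnone d hdmem
        simp only [hPdef] at hcontra
        have htrue : F.contains (String.ofList [d]) = true := List.contains_iff_mem.mpr hdF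
        rw [htrue] at hcontra
        exact absurd hcontra (by simp)
      exact hxne (hxd.trans hfind)
    rw [this]
    simp [PySem.List.min?_eq_none_iff]
  | some j =>
    obtain ⟨hj, hPj, hminj⟩ := List.findIdx?_eq_some_iff_getElem.mp h
    have hsame : ∀ i (hi : i < cs.length), cs[i] = cs[j] → P cs[i] = true := by
      intro i hi hy; rw [hy]; exact hPj
    have hminj' : ∀ i (hi : i < cs.length), i < j → P cs[i] = false := by
      intro i hi hij
      have := hminj i hij
      simpa using this
    have hfj : PySem.Chars.find cs [cs[j]] = (j : Int) :=
      find_singleton_eq cs j hj P hminj' hsame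
    -- (j : Int) is a member of hits
    have hjmem : (j : Int) ∈ hits := by
      rw [hhits, List.mem_filter]
      constructor
      · rw [List.mem_map]
        refine ⟨String.ofList [cs[j]], ?_, ?_⟩
        · rw [List.mem_filter]
          refine ⟨?_, ?_⟩
          · have hPj' := hPj
            simp only [hPdef] at hPj'
            exact List.contains_iff_mem.mp hPj'
          · simp [PySem.Str.len_eq]
        · rw [PySem.Str.find_eq, String.toList_ofList, ← hcs, hfj]
      · simp
    -- every member of hits is at least (j : Int)
    have hlb : ∀ x ∈ hits, (j : Int) ≤ x := by
      intro x hx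
      obtain ⟨d, hdF, hxd, hxne⟩ := hits_shape x hx
      have hnn : 0 ≤ x := by
        have := PySem.Chars.neg_one_le_find cs [d]
        rw [← hxd] at this
        omega
      obtain ⟨hpre, _⟩ := PySem.Chars.find_spec (hxd ▸ hnn)
      have hhead : (cs.drop (PySem.Chars.find cs [d]).toNat).head? = some d :=
        (pv_singleton_prefix _ _).mp hpre
      rw [List.head?_drop] at hhead
      set t := (PySem.Chars.find cs [d]).toNat with htdef
      have htlt : t < cs.length := by
        by_contra hcon
        rw [List.getElem?_eq_none (by omega)] at hhead
        simp at hhead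
      have hct : cs[t] = d := by simpa [htlt] using hhead
      have hPt : P cs[t] = true := by
        simp only [hPdef, hct]
        exact List.contains_iff_mem.mpr hdF
      have : ¬ t < j := by
        intro hcon
        have := hminj' t htlt hcon
        rw [hPt] at this; simp at this
      have : (j : Int) ≤ (t : Int) := by omega
      omega
    -- conclude: the minimum exists and equals (j : Int)
    cases hm : PySem.List.min? hits (fun x => x) with
    | none =>
      rw [PySem.List.min?_eq_none_iff] at hm
      rw [hm] at hjmem
      simp at hjmem
    | some m =>
      have hmmem := PySem.List.min?_mem hm
      have hmle := PySem.List.min?_isMin hm (j : Int) hjmem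
      have hjm := hlb m hmmem
      have : m = (j : Int) := le_antisymm (by simpa using hmle) hjm
      simp [this]

-- ===== VERDICT (by name: the statement is the Claim_ definition above) =====
theorem skip_forbidden_letters_spec : Claim_equal_skip_forbidden_letters := by
  intro password F _ _
  unfold Spec_skip_forbidden_letters skip_forbidden_letters skip_forbidden_letters_alt
  rw [skipLoopA_spec]
  simp only [min_hits_eq]
  cases h : password.toList.findIdx? (fun c => F.contains (String.ofList [c])) with
  | none => simp
  | some j =>
    obtain ⟨hj, -, -⟩ := List.findIdx?_eq_some_iff_getElem.mp h
    simp [pvHitA, skipToB, PySem.List.slice_to_natCast, List.getElem?_eq_getElem hj]
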